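-- pv_equiv track=rewrite | github.com/CSCfi/fairdata-etsin-qvain | etsin_finder/utils/flags.py | _get_partial_paths
-- ===== SOURCE A (Python) =====
-- def _get_partial_paths(paths, include_full=False):
--     """Split flag paths into groups."""
--     partials = set()
--     for path in paths:
--         parts = path.split('.')
--         limit = len(parts)
--         if not include_full:
--             limit -= 1
--         for i in range(limit):
--             partials.add('.'.join(parts[0:i + 1]))
--     return partials
-- ===== SOURCE B (Python) =====
-- def _get_partial_paths(paths, include_full=False):
--     """Split flag paths into groups."""
--     partials = set()
--     for path in paths:
--         prefix = []
--         for ch in path: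
--             if ch == '.':
--                 partials.add(''.join(prefix))
--             prefix.append(ch)
--         if include_full:
--             partials.add(path)
--     return partials
-- ===== Notes on version B (the rewrite author's own statement) =====
-- stated objective: alternative
-- what changed: B replaces A's split-into-parts plus repeated '.'.join of growing slices by a single character scan per path that emits the accumulated prefix at each '.' and adds the full path only when include_full.
import Mathlib
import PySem

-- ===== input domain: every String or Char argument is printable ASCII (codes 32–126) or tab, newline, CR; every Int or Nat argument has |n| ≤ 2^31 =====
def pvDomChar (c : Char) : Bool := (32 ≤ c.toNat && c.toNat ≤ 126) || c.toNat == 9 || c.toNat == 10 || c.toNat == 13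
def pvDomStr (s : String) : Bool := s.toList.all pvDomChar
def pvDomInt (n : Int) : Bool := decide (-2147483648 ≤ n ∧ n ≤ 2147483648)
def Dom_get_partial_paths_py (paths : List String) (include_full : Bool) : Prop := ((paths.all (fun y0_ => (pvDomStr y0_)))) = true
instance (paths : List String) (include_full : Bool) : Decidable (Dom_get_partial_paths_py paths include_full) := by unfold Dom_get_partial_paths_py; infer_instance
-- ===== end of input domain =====

-- B replaces A's split-into-parts plus '.'.join of growing slices by a single character scan per path (alternative decomposition).

-- ===== PORT A =====
-- literal port of A: parts = path.split('.'); limit = len(parts), minus 1 unless include_full;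
-- for i in range(limit): partials.add('.'.join(parts[0:i+1]))   (string ops on the List Char side, exact)
def get_partial_paths_py (paths : List String) (include_full : Bool) : List String :=
  paths.foldl
    (fun partials path =>
      let parts := PySem.Chars.splitOn path.toList ['.']
      let limit : Int := if include_full then (parts.length : Int) else (parts.length : Int) - 1
      (PySem.List.pyRange 0 limit 1).foldl
        (fun s i =>
          PySem.Set.add s (String.ofList
            (PySem.Chars.join ['.'] (PySem.List.slice parts (some 0) (some (i + 1))))))
        partials)
    []

-- ===== PORT B =====
-- literal port of B: one scan per path carrying (partials, prefix); emit the prefix at each '.', then the full path if include_full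
def get_partial_paths_py_alt (paths : List String) (include_full : Bool) : List String :=
  paths.foldl
    (fun partials path =>
      let st := path.toList.foldl
        (fun (st : PySem.Set String × List Char) ch =>
          if ch == '.' then (PySem.Set.add st.1 (String.ofList st.2), st.2 ++ [ch])
          else (st.1, st.2 ++ [ch]))
        (partials, ([] : List Char))
      if include_full then PySem.Set.add st.1 path else st.1)
    []

-- ===== PRECONDITION & SPEC =====
def Spec_get_partial_paths_py (paths : List String) (include_full : Bool) (out : List String) : Prop := out = get_partial_paths_py_alt paths include_full
instance (paths : List String) (include_full : Bool) (out : List String) : Decidable (Spec_get_partial_paths_py paths include_full out) := by unfold Spec_get_partial_paths_py; infer_instance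

-- ===== CLAIM (what is proved, stated in full; the proofs are below) =====
def Claim_equal_get_partial_paths_py : Prop := ∀ (paths : List String) (include_full : Bool), Dom_get_partial_paths_py paths include_full → Spec_get_partial_paths_py paths include_full (get_partial_paths_py paths include_full)

-- ===== LEMMAS AND PROOFS =====

-- structural characterisation of path.split('.')
def pvSp : List Char → List (List Char)
  | [] => [[]]
  | c :: rest =>
    if c = '.' then [] :: pvSp rest
    else
      match pvSp rest with
      | [] => [[c]]
      | h :: t => (c :: h) :: t

-- the proper dotted prefixes of `l`, each preceded by the already-consumed prefix `pre`
def pvEm : List Char → List Char → List (List Char)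
  | _, [] => []
  | pre, c :: rest => if c = '.' then pre :: pvEm (pre ++ [c]) rest else pvEm (pre ++ [c]) rest

theorem pvSp_ne_nil (l : List Char) : pvSp l ≠ [] := by
  cases l with
  | nil => simp [pvSp]
  | cons c rest =>
    simp only [pvSp]
    split_ifs
    · simp
    · cases h : pvSp rest <;> simp

theorem pvSplitOn_go_eq (fuel : Nat) (l cur : List Char) (acc : List (List Char))
    (h : l.length ≤ fuel) :
    PySem.Chars.splitOn.go ['.'] fuel l cur acc
      = acc.reverse ++ ((cur.reverse ++ (pvSp l).headI) :: (pvSp l).tail) := by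
  induction fuel generalizing l cur acc with
  | zero =>
    have hl : l = [] := by cases l <;> simp_all
    subst hl
    simp [PySem.Chars.splitOn.go, pvSp]
  | succ fuel ih =>
    cases l with
    | nil => simp [PySem.Chars.splitOn.go, pvSp]
    | cons c rest =>
      by_cases hc : c = '.'
      · subst hc
        have hpre : (['.'] : List Char).isPrefixOf ('.' :: rest) = true := by
          simp [List.isPrefixOf]
        rw [PySem.Chars.splitOn.go]
        simp only [hpre, List.length_singleton, List.drop_succ_cons, List.drop_zero]
        rw [ih rest [] (cur.reverse :: acc) (Nat.le_of_succ_le_succ (by simpa using h))]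
        have hsp : (pvSp rest).headI :: (pvSp rest).tail = pvSp rest := by
          cases hr : pvSp rest with
          | nil => exact absurd hr (pvSp_ne_nil rest)
          | cons a b => simp
        simp [pvSp, hsp]
      · have hpre : (['.'] : List Char).isPrefixOf (c :: rest) = false := by
          simp [List.isPrefixOf]
          exact fun hcc => hc hcc.symm
        rw [PySem.Chars.splitOn.go]
        simp only [hpre, Bool.false_eq_true, if_false]
        rw [ih rest (c :: cur) acc (Nat.le_of_succ_le_succ (by simpa using h))]
        cases hr : pvSp rest with
        | nil => exact absurd hr (pvSp_ne_nil rest)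
        | cons a b => simp [pvSp, hc, hr]

theorem pvSplitOn_eq (l : List Char) : PySem.Chars.splitOn l ['.'] = pvSp l := by
  rw [PySem.Chars.splitOn, pvSplitOn_go_eq (l.length + 1) l [] [] (Nat.le_succ _)]
  cases hr : pvSp l with
  | nil => exact absurd hr (pvSp_ne_nil l)
  | cons a b => simp

theorem pvJoin_cons_cons (sep a b : List Char) (t : List (List Char)) :
    PySem.Chars.join sep (a :: b :: t) = a ++ sep ++ PySem.Chars.join sep (b :: t) := by
  simp [PySem.Chars.join, List.intercalate, List.intersperse]

-- '.'.join of the first k+1 split parts, for k = 0..len(parts)-1: each proper dotted prefix, then the whole string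
theorem pvJoins_eq (l pre : List Char) :
    (List.range (pvSp l).length).map
        (fun k => pre ++ PySem.Chars.join ['.'] ((pvSp l).take (k + 1)))
      = pvEm pre l ++ [pre ++ l] := by
  induction l generalizing pre with
  | nil => simp [pvSp, pvEm]
  | cons c rest ih =>
    by_cases hc : c = '.'
    · subst hc
      cases hr : pvSp rest with
      | nil => exact absurd hr (pvSp_ne_nil rest)
      | cons a b =>
        have hsp : pvSp ('.' :: rest) = [] :: a :: b := by simp [pvSp, hr]
        rw [hsp]
        have hlen1 : (([] : List Char) :: a :: b).length = (a :: b).length + 1 := rfl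
        rw [hlen1, List.range_succ_eq_map, List.map_cons, List.map_map]
        have h0 : pre ++ PySem.Chars.join ['.'] ((([] : List Char) :: a :: b).take (0 + 1)) = pre := by
          simp
        rw [h0]
        have hmap : List.map
              ((fun k => pre ++ PySem.Chars.join ['.'] ((([] : List Char) :: a :: b).take (k + 1))) ∘ Nat.succ)
              (List.range (a :: b).length)
            = List.map (fun k => (pre ++ ['.']) ++ PySem.Chars.join ['.'] ((a :: b).take (k + 1)))
              (List.range (a :: b).length) := by
          apply List.map_congr_left
          intro k _
          have htake : (([] : List Char) :: a :: b).take (k.succ + 1)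
              = ([] : List Char) :: ((a :: b).take (k + 1)) := by simp
          simp only [Function.comp_apply, htake]
          cases htk : (a :: b).take (k + 1) with
          | nil => simp at htk
          | cons x y => rw [pvJoin_cons_cons]; simp
        rw [hmap]
        have hih := ih (pre ++ ['.'])
        rw [hr] at hih
        rw [hih]
        simp [pvEm]
    · cases hr : pvSp rest with
      | nil => exact absurd hr (pvSp_ne_nil rest)
      | cons a b =>
        have hsp : pvSp (c :: rest) = (c :: a) :: b := by simp [pvSp, hc, hr]
        rw [hsp]
        have hmap : List.map (fun k => pre ++ PySem.Chars.join ['.'] (((c :: a) :: b).take (k + 1)))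
              (List.range ((c :: a) :: b).length)
            = List.map (fun k => (pre ++ [c]) ++ PySem.Chars.join ['.'] ((a :: b).take (k + 1)))
              (List.range (a :: b).length) := by
          have hlen : ((c :: a) :: b).length = (a :: b).length := by simp
          rw [hlen]
          apply List.map_congr_left
          intro k _
          have htake : ((c :: a) :: b).take (k + 1) = (c :: a) :: b.take k := by simp
          have htake2 : (a :: b).take (k + 1) = a :: b.take k := by simp
          rw [htake, htake2]
          cases hb : b.take k with
          | nil => simp
          | cons x y => rw [pvJoin_cons_cons, pvJoin_cons_cons]; simp
        rw [hmap]
        have hih := ih (pre ++ [c])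
        rw [hr] at hih
        rw [hih]
        simp [pvEm, hc]

-- B's inner scan, described as Set.update with the emitted prefixes
theorem pvB_inner (l pre : List Char) (s : PySem.Set String) :
    l.foldl
        (fun (st : PySem.Set String × List Char) ch =>
          if ch == '.' then (PySem.Set.add st.1 (String.ofList st.2), st.2 ++ [ch])
          else (st.1, st.2 ++ [ch]))
        (s, pre)
      = (PySem.Set.update s ((pvEm pre l).map String.ofList), pre ++ l) := by
  induction l generalizing pre s with
  | nil => simp [pvEm, PySem.Set.update]
  | cons c rest ih =>
    by_cases hc : c = '.'
    · subst hc
      simp only [List.foldl_cons, beq_self_eq_true, if_pos]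
      rw [ih]
      simp [pvEm, PySem.Set.update]
    · have hbeq : (c == '.') = false := by simp [hc]
      simp only [List.foldl_cons, hbeq, Bool.false_eq_true, if_false]
      rw [ih]
      simp [pvEm, hc]

theorem pvUpdate_append (s : PySem.Set String) (xs ys : List String) :
    PySem.Set.update s (xs ++ ys) = PySem.Set.update (PySem.Set.update s xs) ys := by
  simp [PySem.Set.update, List.foldl_append]

-- per-path: A's inner loop adds exactly the same strings, in the same order, as B's scan
theorem pvPath_eq (s : PySem.Set String) (path : String) (include_full : Bool) :
    (let parts := PySem.Chars.splitOn path.toList ['.']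
     let limit : Int := if include_full then (parts.length : Int) else (parts.length : Int) - 1
     (PySem.List.pyRange 0 limit 1).foldl
       (fun s i =>
         PySem.Set.add s (String.ofList
           (PySem.Chars.join ['.'] (PySem.List.slice parts (some 0) (some (i + 1))))))
       s)
      = (let st := path.toList.foldl
          (fun (st : PySem.Set String × List Char) ch =>
            if ch == '.' then (PySem.Set.add st.1 (String.ofList st.2), st.2 ++ [ch])
            else (st.1, st.2 ++ [ch]))
          (s, ([] : List Char))
         if include_full then PySem.Set.add st.1 path else st.1) := by
  simp only [pvSplitOn_eq, pvB_inner]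
  have hJ := pvJoins_eq path.toList []
  simp only [List.nil_append] at hJ
  have hlen : (pvEm [] path.toList).length + 1 = (pvSp path.toList).length := by
    have := congrArg List.length hJ
    simpa using this.symm
  have hmapJ : ∀ (m : Nat),
      (List.range m).map
          (fun (k : Nat) => String.ofList (PySem.Chars.join ['.']
            (PySem.List.slice (pvSp path.toList) (some (0 : Int)) (some ((k : Int) + 1)))))
        = ((List.range m).map
            (fun k => PySem.Chars.join ['.'] ((pvSp path.toList).take (k + 1)))).map String.ofList := by
    intro m
    rw [List.map_map]
    apply List.map_congr_left
    intro k _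
    have hcast : ((k : Int) + 1) = ((k + 1 : Nat) : Int) := by push_cast; ring
    simp only [Function.comp_apply, PySem.List.slice_zero_start, hcast, PySem.List.slice_to_natCast]
  cases include_full with
  | false =>
    simp only [Bool.false_eq_true, if_false]
    have hlim : ((pvSp path.toList).length : Int) - 1 = (((pvSp path.toList).length - 1 : Nat) : Int) := by
      omega
    rw [hlim, PySem.List.pyRange_zero_natCast, List.foldl_map,
        ← PySem.Set.update_map_eq_foldl_add, hmapJ]
    congr 1
    have hrange : List.range ((pvSp path.toList).length - 1)
        = (List.range (pvSp path.toList).length).take ((pvSp path.toList).length - 1) := by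
      rw [List.take_range]
      congr 1
      omega
    rw [hrange, List.map_take, hJ, List.take_left' (by omega)]
  | true =>
    simp only [if_pos]
    rw [PySem.List.pyRange_zero_natCast, List.foldl_map,
        ← PySem.Set.update_map_eq_foldl_add, hmapJ, hJ]
    rw [List.map_append, pvUpdate_append]
    simp [PySem.Set.update, String.ofList_toList]

-- ===== VERDICT (by name: the statement is the Claim_ definition above) =====
theorem get_partial_paths_py_spec : Claim_equal_get_partial_paths_py := by
  intro paths include_full _
  unfold Spec_get_partial_paths_py get_partial_paths_py get_partial_paths_py_alt
  exact PySem.List.foldl_congr_mem paths _ _ []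
    (fun acc x _ => pvPath_eq acc x include_full)
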